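-- pv_equiv track=rewrite | github.com/AmitZUlan/Final-Project | SuccessRate/main.py | check_mistakes
-- ===== SOURCE A (Python) =====
-- def coverage(given_IRR, key, AS_coverage_list1, AS_coverage_list2):
--     if given_IRR[key] != 'Unknown': return
--     if key[0] not in AS_coverage_list1:
--         AS_coverage_list1.append(key[0])
--     for AS in key:
--         if AS not in AS_coverage_list2:
--             AS_coverage_list2.append(AS)
--
-- def is_match(class1, class2):
--     return 1 if class1 == class2 else 0
--
-- def key_analysis(given_dicts, key1, reverse=False):
--     dict1, dict2 = given_dicts
--     key2 = tuple(reversed(key1)) if reverse else key1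
--     if key1 not in dict1.keys() or key2 not in dict2.keys():
--         return 0, 0
--     if dict1[key1] == 'Unknown' or dict2[key2] == 'Unknown':
--         return 0, 0
--     val1 = dict1[key1]
--     val2 = ''.join(reversed(dict2[key2])) if reverse else dict2[key2]
--     match = is_match(val1, val2)
--     return 1, match
--
-- def check_mistakes(given_IRR, mistakes):
--     results = list()
--     for i in range(10, 50, 1):
--         forbidden_list = list()
--         two_sided_classifications = 0
--         two_sided_agreements = 0
--         AS_coverage_list_1_side = list()
--         AS_coverage_list_2_side = list()
--         for AS, count in mistakes.items():
--             if count > i: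
--                 forbidden_list.append(AS)
--         for key in given_IRR:
--             if key[0] in forbidden_list: continue
--             key_2_sided, key_2_sided_match = key_analysis((given_IRR, given_IRR), key, True)
--             two_sided_classifications += key_2_sided
--             two_sided_agreements += key_2_sided_match
--             coverage(given_IRR, key, AS_coverage_list_1_side, AS_coverage_list_2_side)
--         results.append((i, two_sided_classifications, two_sided_agreements, len(AS_coverage_list_1_side), len(AS_coverage_list_2_side)))
--     return results
-- ===== SOURCE B (Python) =====
-- def check_mistakes(given_IRR, mistakes):
--     # one pass: per-key stats precomputed, then incremental accumulation over thresholds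
--     recs = []
--     for key, val in given_IRR.items():
--         c = mistakes.get(key[0])
--         rv = given_IRR.get(key[::-1])
--         if rv is None:
--             cls = agr = 0
--         else:
--             cls = 1 if (val != 'Unknown' and rv != 'Unknown') else 0
--             agr = 1 if (cls == 1 and val == rv[::-1]) else 0
--         recs.append((key, val == 'Unknown', c, cls, agr))
--     base = [r for r in recs if r[2] is None or r[2] <= 10]
--     pend = [(r[2], r) for r in recs if r[2] is not None and 10 < r[2] < 50]
--     buckets = {}
--     for c, r in pend:
--         buckets.setdefault(c, []).append(r)
--     cls_t = sum(r[3] for r in base)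
--     agr_t = sum(r[4] for r in base)
--     cov1 = set(r[0][0] for r in base if r[1])
--     cov2 = set(a for r in base if r[1] for a in r[0])
--     results = []
--     for i in range(10, 50):
--         ext = buckets.get(i, [])
--         cls_t += sum(r[3] for r in ext)
--         agr_t += sum(r[4] for r in ext)
--         cov1.update(r[0][0] for r in ext if r[1])
--         cov2.update(a for r in ext if r[1] for a in r[0])
--         results.append((i, cls_t, agr_t, len(cov1), len(cov2)))
--     return results
-- ===== Notes on version B (the rewrite author's own statement) =====
-- stated objective: faster
-- what changed: B precomputes each key's match/coverage record in a single pass over the dict, buckets records by the mistake-count threshold at which they become admissible, and accumulates the counts and coverage sets incrementally across the 40 thresholds, instead of rebuilding the forbidden list and rescanning every key (with a linear list-membership test per key) for every threshold as A does.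
import Mathlib
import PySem

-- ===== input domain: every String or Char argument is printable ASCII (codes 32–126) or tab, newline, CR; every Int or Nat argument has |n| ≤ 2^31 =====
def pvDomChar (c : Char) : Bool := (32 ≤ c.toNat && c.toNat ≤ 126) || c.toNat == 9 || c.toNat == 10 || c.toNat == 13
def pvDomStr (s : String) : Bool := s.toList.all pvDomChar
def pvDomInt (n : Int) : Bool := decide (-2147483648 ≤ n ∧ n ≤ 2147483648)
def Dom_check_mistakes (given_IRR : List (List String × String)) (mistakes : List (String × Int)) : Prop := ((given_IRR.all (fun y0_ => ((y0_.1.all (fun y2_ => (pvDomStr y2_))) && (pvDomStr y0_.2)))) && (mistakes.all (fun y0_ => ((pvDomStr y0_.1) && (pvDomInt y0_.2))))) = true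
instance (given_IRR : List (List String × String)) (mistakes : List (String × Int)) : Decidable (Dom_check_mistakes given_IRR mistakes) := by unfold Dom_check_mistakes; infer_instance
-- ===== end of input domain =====

-- B replaces A's per-threshold rebuild (forbidden list + full rescan of all keys with list-membership
-- tests) by a single pass that precomputes each key's match/coverage record once, buckets records by the
-- threshold at which they become admissible, and accumulates counts and coverage sets incrementally.

-- ===== PORT A =====
-- helper is_match
def pvIsMatch (class1 class2 : String) : Int := if class1 = class2 then 1 else 0

-- helper key_analysis (dict1[key1]/dict2[key2] are guarded by the contains test, so getD is exact)
def pvKeyAnalysis (dict1 dict2 : PySem.Dict (List String) String) (key1 : List String)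
    (reverse : Bool) : Int × Int :=
  let key2 := if reverse then key1.reverse else key1
  if !dict1.contains key1 || !dict2.contains key2 then (0, 0)
  else if dict1.getD key1 "" = "Unknown" ∨ dict2.getD key2 "" = "Unknown" then (0, 0)
  else
    let val1 := dict1.getD key1 ""
    -- ''.join(reversed(s)) is the reversed string
    let val2 := if reverse then String.ofList (dict2.getD key2 "").toList.reverse
                else dict2.getD key2 ""
    (1, pvIsMatch val1 val2)

-- helper coverage (mutates the two lists; ported as returning the two updated lists;
-- `if x not in l: l.append(x)` is exactly PySem.Set.add)
def pvCoverage (given_IRR : PySem.Dict (List String) String) (key : List String)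
    (s1 s2 : PySem.Set String) : PySem.Set String × PySem.Set String :=
  if given_IRR.getD key "" ≠ "Unknown" then (s1, s2)
  else (PySem.Set.add s1 (PySem.List.pyGetD key 0 ""), key.foldl PySem.Set.add s2)

-- the forbidden-list loop of A's outer iteration
def pvForbidden (mistakes : PySem.Dict String Int) (i : Int) : List String :=
  mistakes.items.foldl (fun fl p => if p.2 > i then fl ++ [p.1] else fl) []

-- the body of A's inner `for key in given_IRR` loop (key[0] = pyGetD key 0 "", exact for nonempty key — Pre_)
def pvStepA (d : PySem.Dict (List String) String) (forbidden : List String)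
    (st : Int × Int × PySem.Set String × PySem.Set String) (key : List String) :
    Int × Int × PySem.Set String × PySem.Set String :=
  if forbidden.contains (PySem.List.pyGetD key 0 "") then st
  else
    let r := pvKeyAnalysis d d key true
    let sc := pvCoverage d key st.2.2.1 st.2.2.2
    (st.1 + r.1, st.2.1 + r.2, sc.1, sc.2)

def check_mistakes (given_IRR : List (List String × String)) (mistakes : List (String × Int)) :
    List (Int × Int × Int × Int × Int) :=
  let d := PySem.Dict.ofList given_IRR
  let md := PySem.Dict.ofList mistakes
  (PySem.List.pyRange 10 50 1).foldl (fun results i =>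
    let forbidden := pvForbidden md i
    let st := d.keys.foldl (pvStepA d forbidden)
      (0, 0, (PySem.Set.empty : PySem.Set String), (PySem.Set.empty : PySem.Set String))
    results ++ [(i, st.1, st.2.1, PySem.Set.len st.2.2.1, PySem.Set.len st.2.2.2)]) []

-- ===== PORT B =====
-- per-key record: (key, value == 'Unknown', mistakes.get(key[0]), classification, agreement)
structure PVRec where
  key : List String
  unk : Bool
  c? : Option Int
  cls : Int
  agr : Int
deriving Repr, DecidableEq

def pvMkRec (d : PySem.Dict (List String) String) (md : PySem.Dict String Int)
    (kv : List String × String) : PVRec :=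
  let c? := md.get? (PySem.List.pyGetD kv.1 0 "")
  match d.get? kv.1.reverse with
  | none => ⟨kv.1, kv.2 == "Unknown", c?, 0, 0⟩
  | some rv =>
      let cls : Int := if kv.2 ≠ "Unknown" ∧ rv ≠ "Unknown" then 1 else 0
      let agr : Int := if (kv.2 ≠ "Unknown" ∧ rv ≠ "Unknown") ∧
                          kv.2 = String.ofList rv.toList.reverse then 1 else 0
      ⟨kv.1, kv.2 == "Unknown", c?, cls, agr⟩

def pvBaseP (r : PVRec) : Bool := match r.c? with | none => true | some c => decide (c ≤ 10)

def pvPendP (r : PVRec) : Option (Int × PVRec) :=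
  match r.c? with
  | none => none
  | some c => if 10 < c ∧ c < 50 then some (c, r) else none

def pvSumCls (rs : List PVRec) : Int := (rs.map (fun r => r.cls)).sum
def pvSumAgr (rs : List PVRec) : Int := (rs.map (fun r => r.agr)).sum
def pvCov1 (rs : List PVRec) : List String :=
  (rs.filter (fun r => r.unk)).map (fun r => PySem.List.pyGetD r.key 0 "")
def pvCov2 (rs : List PVRec) : List String :=
  (rs.filter (fun r => r.unk)).flatMap (fun r => r.key)

-- one threshold step of B's result loop
def pvStepB (buckets : PySem.Dict Int (List PVRec))
    (st : List (Int × Int × Int × Int × Int) × Int × Int × PySem.Set String × PySem.Set String)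
    (i : Int) :
    List (Int × Int × Int × Int × Int) × Int × Int × PySem.Set String × PySem.Set String :=
  let ext := buckets.getD i []
  let cls := st.2.1 + pvSumCls ext
  let agr := st.2.2.1 + pvSumAgr ext
  let c1 := PySem.Set.update st.2.2.2.1 (pvCov1 ext)
  let c2 := PySem.Set.update st.2.2.2.2 (pvCov2 ext)
  (st.1 ++ [(i, cls, agr, PySem.Set.len c1, PySem.Set.len c2)], cls, agr, c1, c2)

def check_mistakes_alt (given_IRR : List (List String × String)) (mistakes : List (String × Int)) :
    List (Int × Int × Int × Int × Int) :=
  let d := PySem.Dict.ofList given_IRR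
  let md := PySem.Dict.ofList mistakes
  let recs := d.items.map (pvMkRec d md)
  let base := recs.filter pvBaseP
  let pend := recs.filterMap pvPendP
  let buckets := pend.foldl (fun bd p => bd.modify p.1 [] (· ++ [p.2])) PySem.Dict.empty
  ((PySem.List.pyRange 10 50 1).foldl (pvStepB buckets)
    ([], pvSumCls base, pvSumAgr base,
     PySem.Set.ofList (pvCov1 base), PySem.Set.ofList (pvCov2 base))).1

-- ===== PRECONDITION & SPEC =====
-- Pre_ excludes only inputs on which A raises: an empty key tuple makes A's `key[0]` raise IndexError
-- (B raises there too).
def Pre_check_mistakes (given_IRR : List (List String × String)) (mistakes : List (String × Int)) : Prop :=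
  ∀ p ∈ given_IRR, p.1 ≠ []
instance (given_IRR : List (List String × String)) (mistakes : List (String × Int)) :
    Decidable (Pre_check_mistakes given_IRR mistakes) := by unfold Pre_check_mistakes; infer_instance

def pvWitness_check_mistakes : (List (List String × String)) × (List (String × Int)) :=
  ([(["A1", "A2"], "p2c"), (["A2", "A1"], "c2p")], [("A1", 20)])

def Spec_check_mistakes (given_IRR : List (List String × String)) (mistakes : List (String × Int))
    (out : List (Int × Int × Int × Int × Int)) : Prop := out = check_mistakes_alt given_IRR mistakes
instance (given_IRR : List (List String × String)) (mistakes : List (String × Int))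
    (out : List (Int × Int × Int × Int × Int)) : Decidable (Spec_check_mistakes given_IRR mistakes out) := by
  unfold Spec_check_mistakes; infer_instance

-- ===== CLAIM (what is proved, stated in full; the proofs are below) =====
def Claim_equal_check_mistakes : Prop := ∀ (given_IRR : List (List String × String)) (mistakes : List (String × Int)), Dom_check_mistakes given_IRR mistakes → Pre_check_mistakes given_IRR mistakes → Spec_check_mistakes given_IRR mistakes (check_mistakes given_IRR mistakes)

-- ===== LEMMAS AND PROOFS =====

-- skip test of A, phrased on the precomputed record
def pvSkip (i : Int) (c? : Option Int) : Bool :=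
  match c? with | none => false | some c => decide (i < c)

def pvAct (i : Int) (r : PVRec) : Bool := !pvSkip i r.c?

-- A's inner-loop body on the record
def pvStepR (i : Int) (st : Int × Int × PySem.Set String × PySem.Set String) (r : PVRec) :
    Int × Int × PySem.Set String × PySem.Set String :=
  if pvSkip i r.c? then st
  else (st.1 + r.cls, st.2.1 + r.agr,
        if r.unk then PySem.Set.add st.2.2.1 (PySem.List.pyGetD r.key 0 "") else st.2.2.1,
        if r.unk then r.key.foldl PySem.Set.add st.2.2.2 else st.2.2.2)

-- the per-threshold output tuple, as a function of the contributing records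
def pvTuple (rs : List PVRec) (i : Int) : Int × Int × Int × Int × Int :=
  (i, pvSumCls rs, pvSumAgr rs,
   PySem.Set.len (PySem.Set.ofList (pvCov1 rs)), PySem.Set.len (PySem.Set.ofList (pvCov2 rs)))

-- records seen up to (excluding) threshold j, on B's side
def pvExtTo (buckets : PySem.Dict Int (List PVRec)) (j : Int) : List PVRec :=
  (PySem.List.pyRange 10 j 1).flatMap (fun c => buckets.getD c [])

lemma pvForbidden_eq (md : PySem.Dict String Int) (i : Int) :
    pvForbidden md i = (md.items.filter (fun p => decide (p.2 > i))).map (fun p => p.1) := by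
  unfold pvForbidden
  have h : (fun (fl : List String) (p : String × Int) => if p.2 > i then fl ++ [p.1] else fl)
      = (fun fl p => if (fun (q : String × Int) => decide (q.2 > i)) p = true then fl ++ [(fun (q : String × Int) => q.1) p] else fl) := by
    funext fl p; simp
  rw [h, PySem.List.foldl_append_if]
  simp

lemma pvForbidden_contains (md : PySem.Dict String Int) (hmd : md.keys.Nodup) (i : Int) (k0 : String) :
    (pvForbidden md i).contains k0 = pvSkip i (md.get? k0) := by
  rw [pvForbidden_eq, Bool.eq_iff_iff]
  simp only [List.contains_eq_mem, List.mem_map, List.mem_filter, decide_eq_true_eq, gt_iff_lt]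
  constructor
  · rintro ⟨p, ⟨hp, hgt⟩, rfl⟩
    have := PySem.Dict.get?_of_mem_items md (k := p.1) (v := p.2) hp hmd
    simp [pvSkip, this, hgt]
  · intro hs
    rcases h : md.get? k0 with _ | c
    · simp [pvSkip, h] at hs
    · simp only [pvSkip, h] at hs
      simp only [decide_eq_true_eq] at hs
      exact ⟨(k0, c), ⟨PySem.Dict.mem_items_of_get?_eq_some md h, hs⟩, rfl⟩

lemma pvStepA_eq_stepR (d : PySem.Dict (List String) String) (md : PySem.Dict String Int)
    (hnd : d.keys.Nodup) (hmd : md.keys.Nodup) (i : Int)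
    (st : Int × Int × PySem.Set String × PySem.Set String)
    (kv : List String × String) (hkv : kv ∈ d.items) :
    pvStepA d (pvForbidden md i) st kv.1 = pvStepR i st (pvMkRec d md kv) := by
  obtain ⟨key, val⟩ := kv
  have hget : d.get? key = some val := PySem.Dict.get?_of_mem_items d hkv hnd
  have hcont : d.contains key = true := by
    rw [PySem.Dict.contains_eq_isSome_get?, hget]; rfl
  have hgetD : d.getD key "" = val := PySem.Dict.getD_of_get?_eq_some d "" hget
  unfold pvStepA
  rw [pvForbidden_contains md hmd]
  rcases hrev : d.get? key.reverse with _ | rv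
  · have hcrev : d.contains key.reverse = false := by
      rw [PySem.Dict.contains_eq_isSome_get?, hrev]; rfl
    simp only [pvMkRec, pvStepR, hrev]
    by_cases hsk : pvSkip i (md.get? (PySem.List.pyGetD key 0 "")) = true
    · simp [hsk]
    · simp only [Bool.not_eq_true] at hsk
      simp only [hsk, Bool.false_eq_true, if_false]
      unfold pvKeyAnalysis pvCoverage
      simp only [if_true, hcont, hcrev, hgetD, Bool.not_false, Bool.not_true, Bool.false_or,
        if_true]
      by_cases hv : val = "Unknown"
      · simp [hv]
      · simp [hv]
  · have hcrev : d.contains key.reverse = true := by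
      rw [PySem.Dict.contains_eq_isSome_get?, hrev]; rfl
    have hgetDrev : d.getD key.reverse "" = rv := PySem.Dict.getD_of_get?_eq_some d "" hrev
    simp only [pvMkRec, pvStepR, hrev]
    by_cases hsk : pvSkip i (md.get? (PySem.List.pyGetD key 0 "")) = true
    · simp [hsk]
    · simp only [Bool.not_eq_true] at hsk
      simp only [hsk, Bool.false_eq_true, if_false]
      unfold pvKeyAnalysis pvCoverage pvIsMatch
      simp only [hcont, hcrev, hgetD, hgetDrev, Bool.not_true, Bool.or_self, Bool.false_or,
        Bool.true_or, if_true, Bool.false_eq_true, if_false]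
      by_cases hv : val = "Unknown"
      · simp [hv]
      · by_cases hrvU : rv = "Unknown"
        · simp [hv, hrvU]
        · have hc : ¬(val = "Unknown" ∨ rv = "Unknown") := by tauto
          simp [hv, hrvU]

lemma pvSumCls_append (xs ys : List PVRec) : pvSumCls (xs ++ ys) = pvSumCls xs + pvSumCls ys := by
  simp [pvSumCls]

lemma pvSumAgr_append (xs ys : List PVRec) : pvSumAgr (xs ++ ys) = pvSumAgr xs + pvSumAgr ys := by
  simp [pvSumAgr]

lemma pvCov1_append (xs ys : List PVRec) : pvCov1 (xs ++ ys) = pvCov1 xs ++ pvCov1 ys := by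
  simp [pvCov1]

lemma pvCov2_append (xs ys : List PVRec) : pvCov2 (xs ++ ys) = pvCov2 xs ++ pvCov2 ys := by
  simp [pvCov2]

lemma foldR_eq (i : Int) (rs : List PVRec) (c a : Int) (s1 s2 : PySem.Set String) :
    rs.foldl (pvStepR i) (c, a, s1, s2) =
      (c + pvSumCls (rs.filter (pvAct i)), a + pvSumAgr (rs.filter (pvAct i)),
       PySem.Set.update s1 (pvCov1 (rs.filter (pvAct i))),
       PySem.Set.update s2 (pvCov2 (rs.filter (pvAct i)))) := by
  induction rs generalizing c a s1 s2 with
  | nil => simp [pvSumCls, pvSumAgr, pvCov1, pvCov2, PySem.Set.update]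
  | cons r rs ih =>
    by_cases hsk : pvSkip i r.c? = true
    · have hact : pvAct i r = false := by simp [pvAct, hsk]
      simp only [List.foldl_cons, pvStepR, hsk, if_true, List.filter_cons, hact,
        Bool.false_eq_true, if_false]
      exact ih c a s1 s2
    · have hact : pvAct i r = true := by simp [pvAct, hsk]
      simp only [Bool.not_eq_true] at hsk
      simp only [List.foldl_cons, pvStepR, hsk, Bool.false_eq_true, if_false,
        List.filter_cons, hact, if_true]
      by_cases hu : r.unk = true
      · simp only [hu, if_true]
        rw [ih]
        simp [pvSumCls, pvSumAgr, pvCov1, pvCov2, PySem.Set.update, hu, add_assoc]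
      · simp only [hu, Bool.false_eq_true, if_false]
        rw [ih]
        simp [pvSumCls, pvSumAgr, pvCov1, pvCov2, hu, add_assoc]

-- A as a map over the threshold range
lemma check_mistakes_eq_map (given_IRR : List (List String × String)) (mistakes : List (String × Int)) :
    check_mistakes given_IRR mistakes =
      (PySem.List.pyRange 10 50 1).map (fun i =>
        pvTuple ((((PySem.Dict.ofList given_IRR).items.map
          (pvMkRec (PySem.Dict.ofList given_IRR) (PySem.Dict.ofList mistakes))).filter (pvAct i)) ) i) := by
  unfold check_mistakes
  set d := PySem.Dict.ofList given_IRR with hd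
  set md := PySem.Dict.ofList mistakes with hmd2
  have hnd : d.keys.Nodup := PySem.Dict.nodup_keys_ofList given_IRR
  have hmd : md.keys.Nodup := PySem.Dict.nodup_keys_ofList mistakes
  have hbody : ∀ (acc : List (Int × Int × Int × Int × Int)), ∀ i ∈ PySem.List.pyRange 10 50 1,
      (fun results i =>
        let forbidden := pvForbidden md i
        let st := d.keys.foldl (pvStepA d forbidden)
          (0, 0, (PySem.Set.empty : PySem.Set String), (PySem.Set.empty : PySem.Set String))
        results ++ [(i, st.1, st.2.1, PySem.Set.len st.2.2.1, PySem.Set.len st.2.2.2)]) acc i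
      = acc ++ [pvTuple ((d.items.map (pvMkRec d md)).filter (pvAct i)) i] := by
    intro acc i _
    have hkeys : d.keys = d.items.map (fun p => p.1) := rfl
    have h1 : d.keys.foldl (pvStepA d (pvForbidden md i))
        (0, 0, (PySem.Set.empty : PySem.Set String), (PySem.Set.empty : PySem.Set String))
        = (d.items.map (pvMkRec d md)).foldl (pvStepR i)
          (0, 0, (PySem.Set.empty : PySem.Set String), (PySem.Set.empty : PySem.Set String)) := by
      rw [hkeys, List.foldl_map, List.foldl_map]
      exact PySem.List.foldl_congr_mem d.items _ _ _
        (fun st kv hkv => pvStepA_eq_stepR d md hnd hmd i st kv hkv)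
    simp only [h1, foldR_eq]
    simp [pvTuple, PySem.Set.empty, PySem.Set.update_nil_left]
  rw [PySem.List.foldl_congr_mem _ _ _ _ hbody, PySem.List.foldl_append_singleton_eq_map]
  simp

-- B's loop, characterised
lemma pvExtTo_succ (bk : PySem.Dict Int (List PVRec)) (j : Int) (hj : 10 ≤ j) :
    pvExtTo bk (j + 1) = pvExtTo bk j ++ bk.getD j [] := by
  unfold pvExtTo
  rw [PySem.List.pyRange_one_succ_right hj, List.flatMap_append]
  simp

lemma foldB_eq (bk : PySem.Dict Int (List PVRec)) (base : List PVRec) (n : Nat) :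
    (PySem.List.pyRange 10 (10 + (n : Int)) 1).foldl (pvStepB bk)
      ([], pvSumCls base, pvSumAgr base,
       PySem.Set.ofList (pvCov1 base), PySem.Set.ofList (pvCov2 base)) =
    ((PySem.List.pyRange 10 (10 + (n : Int)) 1).map (fun i => pvTuple (base ++ pvExtTo bk (i + 1)) i),
     pvSumCls (base ++ pvExtTo bk (10 + (n : Int))), pvSumAgr (base ++ pvExtTo bk (10 + (n : Int))),
     PySem.Set.ofList (pvCov1 (base ++ pvExtTo bk (10 + (n : Int)))),
     PySem.Set.ofList (pvCov2 (base ++ pvExtTo bk (10 + (n : Int))))) := by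
  induction n with
  | zero =>
    have h0 : pvExtTo bk 10 = [] := by
      unfold pvExtTo
      rw [PySem.List.pyRange_one_eq_nil (le_refl 10)]
      rfl
    simp [PySem.List.pyRange_one_eq_nil (le_refl (10 : Int)), h0]
  | succ n ih =>
    have hcast : ((n + 1 : Nat) : Int) = (n : Int) + 1 := by push_cast; ring_nf
    have hle : (10 : Int) ≤ 10 + (n : Int) := by omega
    rw [hcast, ← add_assoc, PySem.List.pyRange_one_succ_right hle, List.foldl_append,
      List.map_append, ih]
    have hext : pvExtTo bk (10 + (n : Int) + 1) = pvExtTo bk (10 + (n : Int)) ++ bk.getD (10 + (n : Int)) [] :=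
      pvExtTo_succ bk _ hle
    simp only [List.foldl_cons, List.foldl_nil, pvStepB, List.map_cons, List.map_nil]
    rw [hext]
    simp [pvSumCls_append, pvSumAgr_append, pvCov1_append, pvCov2_append,
      PySem.Set.ofList_append, PySem.Set.update_append, pvTuple, add_assoc]

lemma bucket_getD (recs : List PVRec) (c : Int) :
    ((recs.filterMap pvPendP).foldl (fun bd p => bd.modify p.1 [] (· ++ [p.2]))
      PySem.Dict.empty).getD c []
      = ((recs.filterMap pvPendP).filter (fun p => p.1 == c)).map (fun p => p.2) := by
  rw [PySem.Dict.getD_foldl_modify_append]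
  simp

lemma bucket_char (recs : List PVRec) (c : Int) (h10 : 10 < c) (h50 : c < 50) :
    ((recs.filterMap pvPendP).foldl (fun bd p => bd.modify p.1 [] (· ++ [p.2]))
      PySem.Dict.empty).getD c [] = recs.filter (fun r => r.c? == some c) := by
  rw [bucket_getD]
  induction recs with
  | nil => rfl
  | cons r rs ih =>
    rcases hr : r.c? with _ | c'
    · have hp : pvPendP r = none := by simp [pvPendP, hr]
      simp only [List.filterMap_cons, hp, List.filter_cons, hr]
      simpa using ih
    · by_cases h5 : 10 < c' ∧ c' < 50
      · have hp : pvPendP r = some (c', r) := by simp [pvPendP, hr, h5]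
        by_cases hc : c' = c
        · subst hc
          simp only [List.filterMap_cons, hp, List.filter_cons, hr, beq_self_eq_true, if_true,
            List.map_cons]
          rw [ih]
        · simp only [List.filterMap_cons, hp, List.filter_cons, hr]
          have h1 : ((c', r).1 == c) = false := by simpa using hc
          have h2 : ((some c' : Option Int) == some c) = false := by simpa using hc
          simp only [h1, h2, Bool.false_eq_true, if_false]
          exact ih
      · have hp : pvPendP r = none := by simp [pvPendP, hr, h5]
        have hc : c' ≠ c := by omega
        simp only [List.filterMap_cons, hp, List.filter_cons, hr]
        have h2 : ((some c' : Option Int) == some c) = false := by simpa using hc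
        simp only [h2, Bool.false_eq_true, if_false]
        exact ih

lemma bucket_ten (recs : List PVRec) :
    ((recs.filterMap pvPendP).foldl (fun bd p => bd.modify p.1 [] (· ++ [p.2]))
      PySem.Dict.empty).getD 10 [] = [] := by
  rw [bucket_getD]
  have h : (recs.filterMap pvPendP).filter (fun p => p.1 == (10 : Int)) = [] := by
    rw [List.filter_eq_nil_iff]
    intro p hp
    rcases List.mem_filterMap.mp hp with ⟨r, _, hr⟩
    rcases hc : r.c? with _ | c' <;> simp [pvPendP, hc] at hr
    rcases hr with ⟨⟨h10, h50⟩, rfl, -⟩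
    simpa using (by omega : ¬ (c' = 10))
  rw [h]
  rfl

lemma filter_act_ten (recs : List PVRec) : recs.filter (pvAct 10) = recs.filter pvBaseP := by
  apply List.filter_congr
  intro r _
  rcases hc : r.c? with _ | c
  · simp [pvAct, pvSkip, pvBaseP, hc]
  · simp only [pvAct, pvSkip, pvBaseP, hc]
    rw [Bool.eq_iff_iff]
    simp only [Bool.not_eq_eq_eq_not, Bool.not_true, decide_eq_false_iff_not, not_lt,
      decide_eq_true_eq]

lemma pvAct_succ (i : Int) (r : PVRec) :
    pvAct (i + 1) r = (pvAct i r || r.c? == some (i + 1)) := by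
  rcases hc : r.c? with _ | c
  · simp [pvAct, pvSkip, hc]
  · simp only [pvAct, pvSkip, hc]
    rw [Bool.eq_iff_iff]
    simp only [Bool.or_eq_true, Bool.not_eq_eq_eq_not, Bool.not_true, decide_eq_false_iff_not,
      not_lt, beq_iff_eq, Option.some.injEq]
    omega

lemma perm_filter_or {α : Type} (l : List α) (p q : α → Bool)
    (hdisj : ∀ x ∈ l, ¬(p x = true ∧ q x = true)) :
    (l.filter (fun x => p x || q x)).Perm (l.filter p ++ l.filter q) := by
  induction l with
  | nil => simp
  | cons x l ih =>
    have ih' := ih (fun y hy => hdisj y (List.mem_cons_of_mem x hy))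
    by_cases hp : p x = true
    · have hq : q x = false := by
        rcases h : q x with _ | _
        · rfl
        · exact absurd ⟨hp, h⟩ (hdisj x (List.mem_cons_self))
      simp only [List.filter_cons, hp, hq, Bool.true_or, if_true, List.cons_append]
      exact ih'.cons x
    · by_cases hq : q x = true
      · simp only [List.filter_cons, hp, hq, Bool.false_eq_true, if_false, Bool.false_or, if_true]
        exact (ih'.cons x).trans List.perm_middle.symm
      · simp only [List.filter_cons, hp, hq, Bool.false_eq_true, if_false, Bool.false_or]
        exact ih' 

-- the crux: contributions at threshold 10+n are a permutation of base ++ buckets up to 10+n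
lemma perm_crux (recs : List PVRec) (n : Nat) (hn : n ≤ 39) :
    (recs.filter (pvAct (10 + (n : Int)))).Perm
      (recs.filter pvBaseP ++
        pvExtTo ((recs.filterMap pvPendP).foldl (fun bd p => bd.modify p.1 [] (· ++ [p.2]))
          PySem.Dict.empty) (10 + (n : Int) + 1)) := by
  set bk := (recs.filterMap pvPendP).foldl (fun bd p => bd.modify p.1 [] (· ++ [p.2]))
    PySem.Dict.empty with hbk
  induction n with
  | zero =>
    simp only [Nat.cast_zero, add_zero]
    have hE : pvExtTo bk ((10 : Int) + 1) = [] := by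
      unfold pvExtTo
      rw [PySem.List.pyRange_one_singleton]
      simp only [List.flatMap_cons, List.flatMap_nil, List.append_nil]
      rw [hbk, bucket_ten]
    rw [hE, List.append_nil, filter_act_ten]
  | succ n ih =>
    have hn' : n ≤ 39 := by omega
    have ih' := ih hn'
    have hcast : ((n + 1 : Nat) : Int) = (n : Int) + 1 := by push_cast; ring_nf
    rw [hcast, ← add_assoc]
    have hfil : recs.filter (pvAct (10 + (n : Int) + 1))
        = recs.filter (fun r => pvAct (10 + (n : Int)) r || r.c? == some (10 + (n : Int) + 1)) := by
      apply List.filter_congr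
      intro r _
      exact pvAct_succ (10 + (n : Int)) r
    rw [hfil]
    have hdisj : ∀ r ∈ recs, ¬(pvAct (10 + (n : Int)) r = true ∧ (r.c? == some (10 + (n : Int) + 1)) = true) := by
      intro r _
      rintro ⟨ha, hb⟩
      rcases hc : r.c? with _ | c
      · rw [hc] at hb; simp at hb
      · rw [hc] at hb
        simp only [beq_iff_eq, Option.some.injEq] at hb
        simp only [pvAct, pvSkip, hc, Bool.not_eq_eq_eq_not, Bool.not_true,
          decide_eq_false_iff_not, not_lt] at ha
        omega
    have hperm := perm_filter_or recs (pvAct (10 + (n : Int))) (fun r => r.c? == some (10 + (n : Int) + 1)) hdisj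
    refine hperm.trans ?_
    have hbucket : recs.filter (fun r => r.c? == some (10 + (n : Int) + 1))
        = bk.getD (10 + (n : Int) + 1) [] := by
      rw [hbk, bucket_char recs (10 + (n : Int) + 1) (by omega) (by push_cast; omega)]
    rw [hbucket]
    have hext : pvExtTo bk (10 + (n : Int) + 1 + 1)
        = pvExtTo bk (10 + (n : Int) + 1) ++ bk.getD (10 + (n : Int) + 1) [] :=
      pvExtTo_succ bk _ (by omega)
    rw [hext, ← List.append_assoc]
    exact ih'.append (List.Perm.refl _)

lemma len_ofList_perm {xs ys : List String} (h : xs.Perm ys) :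
    PySem.Set.len (PySem.Set.ofList xs) = PySem.Set.len (PySem.Set.ofList ys) := by
  have hperm : (PySem.Set.ofList xs).Perm (PySem.Set.ofList ys) := by
    rw [List.perm_ext_iff_of_nodup (PySem.Set.nodup_ofList xs) (PySem.Set.nodup_ofList ys)]
    intro a
    rw [PySem.Set.mem_ofList, PySem.Set.mem_ofList]
    exact h.mem_iff
  simp [PySem.Set.len, hperm.length_eq]

lemma pvTuple_perm (rs rs' : List PVRec) (h : rs.Perm rs') (i : Int) :
    pvTuple rs i = pvTuple rs' i := by
  unfold pvTuple
  have h1 : pvSumCls rs = pvSumCls rs' := (h.map _).sum_eq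
  have h2 : pvSumAgr rs = pvSumAgr rs' := (h.map _).sum_eq
  have hc1 : (pvCov1 rs).Perm (pvCov1 rs') := (h.filter _).map _
  have hc2 : (pvCov2 rs).Perm (pvCov2 rs') :=
    List.Perm.flatMap (h.filter _) (fun a _ => List.Perm.refl _)
  rw [h1, h2, len_ofList_perm hc1, len_ofList_perm hc2]

-- ===== VERDICT (by name: the statement is the Claim_ definition above) =====
lemma foldB_50 (bk : PySem.Dict Int (List PVRec)) (base : List PVRec) :
    (PySem.List.pyRange 10 50 1).foldl (pvStepB bk)
      ([], pvSumCls base, pvSumAgr base,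
       PySem.Set.ofList (pvCov1 base), PySem.Set.ofList (pvCov2 base)) =
    ((PySem.List.pyRange 10 50 1).map (fun i => pvTuple (base ++ pvExtTo bk (i + 1)) i),
     pvSumCls (base ++ pvExtTo bk 50), pvSumAgr (base ++ pvExtTo bk 50),
     PySem.Set.ofList (pvCov1 (base ++ pvExtTo bk 50)),
     PySem.Set.ofList (pvCov2 (base ++ pvExtTo bk 50))) := by
  have h := foldB_eq bk base 40
  norm_num at h
  exact h

lemma check_mistakes_alt_eq_map (given_IRR : List (List String × String)) (mistakes : List (String × Int)) :
    check_mistakes_alt given_IRR mistakes =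
      (PySem.List.pyRange 10 50 1).map (fun i =>
        (fun recs => pvTuple (recs.filter pvBaseP ++
          pvExtTo ((recs.filterMap pvPendP).foldl (fun bd p => bd.modify p.1 [] (· ++ [p.2]))
            PySem.Dict.empty) (i + 1)) i)
        ((PySem.Dict.ofList given_IRR).items.map
          (pvMkRec (PySem.Dict.ofList given_IRR) (PySem.Dict.ofList mistakes)))) := by
  unfold check_mistakes_alt
  simp only [foldB_50]

theorem check_mistakes_spec : Claim_equal_check_mistakes := by
  intro given_IRR mistakes _hdom _hpre
  unfold Spec_check_mistakes
  rw [check_mistakes_eq_map, check_mistakes_alt_eq_map]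
  apply List.map_congr_left
  intro i hi
  rw [PySem.List.mem_pyRange_one] at hi
  obtain ⟨h10, h50⟩ := hi
  set recs := (PySem.Dict.ofList given_IRR).items.map
    (pvMkRec (PySem.Dict.ofList given_IRR) (PySem.Dict.ofList mistakes)) with hrecs
  have hn : i = 10 + ((i - 10).toNat : Int) := by omega
  have hle : (i - 10).toNat ≤ 39 := by omega
  rw [hn]
  exact pvTuple_perm _ _ (perm_crux recs (i - 10).toNat hle) _
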